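/- GENERATED by tools/mkcompositions.py from design/units.gif.tsv (unit `GifFreeExtensions.COMPOSITION`) — do not edit.
   THE PROOF of the composition unit `GifFreeExtensions.COMPOSITION`: the 2 segments of `GifFreeExtensions` chain into its contract, by the theorem
   `Gif.Spec.GifFreeExtensions.compose` (proved next to the cut assertions). -/
import Gif.Spec.Units.GifFreeExtensions_COMPOSITION

/-- The segments of `GifFreeExtensions` compose into its contract. -/
theorem Gif.Spec.Proved.GifFreeExtensions_COMPOSITION_ok : Gif.Spec.GifFreeExtensions_COMPOSITION.Statement := by
  intro Lay _hLay μ _hμ u₀ h_GifFreeExtensions_1 h_GifFreeExtensions_2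
  apply Gif.Spec.GifFreeExtensions.compose
  all_goals assumption
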